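-- pv_equiv track=rewrite | github.com/Gustav-Yellow/XJTLU-ICS | CPT204/Labs/codes/Algorithm_visual/DFS.py | get_active_nodes
-- ===== SOURCE A (Python) =====
-- def get_active_nodes(events_subset):
--     active = set()
--     for t, v, _ in events_subset:
--         if t == 'call':
--             active.add(v)
--         elif t == 'return' and v in active:
--             active.remove(v)
--     return active
-- ===== SOURCE B (Python) =====
-- def get_active_nodes(events_subset):
--     last_ret = {}
--     for i, (t, v, _) in enumerate(events_subset):
--         if t == 'return':
--             last_ret[v] = i
--     active = set()
--     for i, (t, v, _) in enumerate(events_subset):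
--         if t == 'call' and last_ret.get(v, -1) < i:
--             active.add(v)
--     return active
-- ===== Notes on version B (the rewrite author's own statement) =====
-- stated objective: alternative
-- what changed: Replaces A's incremental add/remove simulation of the active set by two index-based passes: a dict recording each node's last 'return' index, then a pass collecting the call events that occur after that index.
import Mathlib
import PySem

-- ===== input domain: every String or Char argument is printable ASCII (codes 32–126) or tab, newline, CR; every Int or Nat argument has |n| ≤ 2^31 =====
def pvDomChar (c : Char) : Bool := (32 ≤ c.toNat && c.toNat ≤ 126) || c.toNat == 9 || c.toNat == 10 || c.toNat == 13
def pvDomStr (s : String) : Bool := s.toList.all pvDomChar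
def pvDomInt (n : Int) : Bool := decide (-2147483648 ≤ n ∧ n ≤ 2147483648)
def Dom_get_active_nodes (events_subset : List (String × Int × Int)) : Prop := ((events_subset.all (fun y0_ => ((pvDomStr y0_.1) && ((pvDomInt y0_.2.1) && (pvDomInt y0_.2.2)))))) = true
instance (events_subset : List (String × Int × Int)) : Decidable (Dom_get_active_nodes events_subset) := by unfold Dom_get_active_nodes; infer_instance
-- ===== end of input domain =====

-- B replaces A's incremental add/remove set simulation by two index-based passes:
-- record each node's last 'return' index in a dict, then collect the calls that come after it (objective: alternative, same cost).
-- Both programs return a Python set; the equivalence below is about its elements (the ports build it in the same canonical order).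

-- ===== PORT A =====
def get_active_nodes (events_subset : List (String × Int × Int)) : List Int :=
  events_subset.foldl
    (fun active e =>
      match e with
      | (t, v, _) =>
        if t == "call" then PySem.Set.add active v
        else if t == "return" && PySem.Set.contains active v then
          ((PySem.Set.remove? active v).getD active)
        else active)
    PySem.Set.empty

-- ===== PORT B =====
def get_active_nodes_alt (events_subset : List (String × Int × Int)) : List Int :=
  let last_ret : PySem.Dict Int Int :=
    (PySem.List.enumerate events_subset).foldl
      (fun d p =>
        match p with
        | (i, (t, v, _)) => if t == "return" then d.insert v i else d)
      PySem.Dict.empty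
  (PySem.List.enumerate events_subset).foldl
    (fun active p =>
      match p with
      | (i, (t, v, _)) =>
        if t == "call" && decide (last_ret.getD v (-1) < i) then PySem.Set.add active v
        else active)
    PySem.Set.empty

-- ===== PRECONDITION & SPEC =====
def Spec_get_active_nodes (events_subset : List (String × Int × Int)) (out : List Int) : Prop := out = get_active_nodes_alt events_subset
instance (events_subset : List (String × Int × Int)) (out : List Int) : Decidable (Spec_get_active_nodes events_subset out) := by unfold Spec_get_active_nodes; infer_instance

-- ===== CLAIM (what is proved, stated in full; the proofs are below) =====
def Claim_equal_get_active_nodes : Prop := ∀ (events_subset : List (String × Int × Int)), Dom_get_active_nodes events_subset → Spec_get_active_nodes events_subset (get_active_nodes events_subset)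

-- ===== LEMMAS AND PROOFS =====

-- last-return dict of B's first pass, with an explicit start index for the snoc induction
def pvLrd (es : List (String × Int × Int)) : PySem.Dict Int Int :=
  (PySem.List.enumerate es).foldl
    (fun d p =>
      match p with
      | (i, (t, v, _)) => if t == "return" then d.insert v i else d)
    PySem.Dict.empty

-- candidate list of B's second pass: the calls whose index beats the last return
def pvCands (d : PySem.Dict Int Int) (l : List (Int × (String × Int × Int))) : List Int :=
  l.filterMap
    (fun p => if p.2.1 == "call" && decide (d.getD p.2.2.1 (-1) < p.1) then some p.2.2.1 else none)

theorem pvFold_eq_update (d : PySem.Dict Int Int) (l : List (Int × (String × Int × Int)))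
    (s : PySem.Set Int) :
    l.foldl
      (fun active p =>
        match p with
        | (i, (t, v, _)) =>
          if t == "call" && decide (d.getD v (-1) < i) then PySem.Set.add active v
          else active) s
    = PySem.Set.update s (pvCands d l) := by
  induction l generalizing s with
  | nil => rfl
  | cons p l ih =>
    obtain ⟨i, t, v, x⟩ := p
    by_cases h : (t == "call" && decide (d.getD v (-1) < i)) = true
    · simp only [List.foldl_cons, pvCands, List.filterMap_cons, h, if_pos, PySem.Set.update] at *
      rw [ih]
    · simp only [List.foldl_cons, pvCands, List.filterMap_cons, h, if_neg, Bool.false_eq_true,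
        not_false_eq_true, PySem.Set.update] at *
      rw [ih]

theorem pvLrd_getD_lt (es : List (String × Int × Int)) (v : Int) :
    (pvLrd es).getD v (-1) < (es.length : Int) := by
  induction es using List.reverseRecOn with
  | nil => simp [pvLrd, PySem.List.enumerate_nil, PySem.Dict.getD_empty]
  | append_singleton es e ih =>
    obtain ⟨t, w, x⟩ := e
    simp only [pvLrd, PySem.List.enumerate_append, List.foldl_append] at *
    simp only [PySem.List.enumerate_cons, PySem.List.enumerate_nil, List.foldl_cons, List.foldl_nil]
    by_cases h : (t == "return") = true
    · simp only [h, if_pos, PySem.Dict.getD_insert]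
      split_ifs with hv
      · simp only [List.length_append, List.length_cons, List.length_nil]
        push_cast; omega
      · simp only [List.length_append, List.length_cons, List.length_nil]
        push_cast; omega
    · simp only [h, if_neg, Bool.false_eq_true, not_false_eq_true]
      simp only [List.length_append, List.length_cons, List.length_nil]
      push_cast; omega

-- the guarded remove in A's 'return' branch is exactly a filter
theorem pvStep_return (s : PySem.Set Int) (v : Int) :
    (if PySem.Set.contains s v then (PySem.Set.remove? s v).getD s else s)
      = PySem.Set.discard s v := by
  by_cases hm : v ∈ s
  · simp [PySem.Set.remove?, hm]
  · simp only [PySem.Set.contains_eq_listContains, List.contains_eq_mem, decide_eq_true_eq, hm,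
      if_neg, not_false_eq_true]
    refine (List.filter_eq_self.mpr ?_).symm
    intro a ha
    have : a ≠ v := fun h => hm (h ▸ ha)
    simp [this]

theorem pvDiscard_add_of_ne (s : PySem.Set Int) (x v : Int) (hxv : (x == v) = false) :
    PySem.Set.discard (PySem.Set.add s x) v = PySem.Set.add (PySem.Set.discard s v) x := by
  by_cases hm : x ∈ s
  · have hm2 : x ∈ PySem.Set.discard s v := by
      simp [PySem.Set.discard, List.mem_filter, hm, hxv]
    simp [PySem.Set.add, hm, hm2, hxv]
  · have hm2 : x ∉ PySem.Set.discard s v := fun h2 => hm (List.mem_filter.mp h2).1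
    simp [PySem.Set.add, hm, PySem.Set.discard, List.filter_append, hxv]

theorem pvOfList_filter_ne (l : List Int) (v : Int) :
    PySem.Set.ofList (l.filter (fun w => !(w == v)))
      = PySem.Set.discard (PySem.Set.ofList l) v := by
  induction l using List.reverseRecOn with
  | nil => rfl
  | append_singleton l x ih =>
    rw [List.filter_append]
    by_cases hx : (x == v) = true
    · simp only [List.filter_cons, List.filter_nil, hx, Bool.not_true, Bool.false_eq_true,
        if_neg, not_false_eq_true, List.append_nil, ih]
      rw [PySem.Set.ofList_append_singleton]
      by_cases hm : x ∈ PySem.Set.ofList l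
      · simp [PySem.Set.add, hm]
      · simp [PySem.Set.add, hm, PySem.Set.discard, List.filter_append, hx]
    · rw [Bool.not_eq_true] at hx
      simp only [List.filter_cons, List.filter_nil, hx, Bool.not_false, if_pos]
      rw [PySem.Set.ofList_append_singleton, PySem.Set.ofList_append_singleton, ih,
        pvDiscard_add_of_ne _ _ _ hx]

theorem pvA_eq_ofList_cands (es : List (String × Int × Int)) :
    get_active_nodes es = PySem.Set.ofList (pvCands (pvLrd es) (PySem.List.enumerate es)) := by
  induction es using List.reverseRecOn with
  | nil => rfl
  | append_singleton es e ih =>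
    obtain ⟨t, v, x⟩ := e
    have hlrd : pvLrd (es ++ [(t, v, x)])
        = (if (t == "return") = true then (pvLrd es).insert v ((0 : Int) + es.length) else pvLrd es) := by
      simp only [pvLrd, PySem.List.enumerate_append, List.foldl_append,
        PySem.List.enumerate_cons, PySem.List.enumerate_nil, List.foldl_cons, List.foldl_nil]
    have henum : PySem.List.enumerate (es ++ [(t, v, x)])
        = PySem.List.enumerate es ++ [(((0 : Int) + es.length), (t, v, x))] := by
      simp [PySem.List.enumerate_append, PySem.List.enumerate_cons, PySem.List.enumerate_nil]
    simp only [get_active_nodes, List.foldl_append, List.foldl_cons, List.foldl_nil] at *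
    by_cases hcall : t = "call"
    · subst hcall
      rw [hlrd, henum]
      have hlt : (pvLrd es).getD v (-1) < ((es.length : Int)) := pvLrd_getD_lt es v
      have hcd : pvCands (pvLrd es) (PySem.List.enumerate es ++ [(((0 : Int) + es.length), ("call", v, x))])
          = pvCands (pvLrd es) (PySem.List.enumerate es) ++ [v] := by
        unfold pvCands
        rw [List.filterMap_append]
        simp [hlt]
      simp only [show (("call" : String) == "return") = false from by decide, Bool.false_eq_true,
        if_neg, not_false_eq_true]
      rw [hcd, PySem.Set.ofList_append_singleton, ← ih]
      simp
    · by_cases hret : t = "return"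
      · subst hret
        rw [hlrd, henum]
        simp only [show (("return" : String) == "return") = true from by decide, if_pos]
        have hcd : pvCands ((pvLrd es).insert v ((0 : Int) + es.length))
              (PySem.List.enumerate es ++ [(((0 : Int) + es.length), ("return", v, x))])
            = (pvCands (pvLrd es) (PySem.List.enumerate es)).filter (fun w => !(w == v)) := by
          unfold pvCands
          rw [List.filterMap_append, List.filter_filterMap]
          have hlast : List.filterMap
              (fun p => if p.2.1 == "call" &&
                  decide ((((pvLrd es).insert v ((0 : Int) + es.length)).getD p.2.2.1 (-1)) < p.1)
                then some p.2.2.1 else none)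
              [(((0 : Int) + es.length), ("return", v, x))] = [] := by
            simp
          rw [hlast, List.append_nil]
          apply List.filterMap_congr
          intro p hp
          obtain ⟨i, t', v', x'⟩ := p
          obtain ⟨k, hk, hpk⟩ := (PySem.List.mem_enumerate_iff es 0 _).mp hp
          have hi : i < (es.length : Int) := by
            have h0 : ((0 : Int) + k, es[k]) = (i, (t', v', x')) := hpk.symm
            have h1 : (0 : Int) + k = i := by rw [Prod.mk.injEq] at h0; exact h0.1
            omega
          show (if t' == "call" &&
              decide ((((pvLrd es).insert v ((0 : Int) + es.length)).getD v' (-1)) < i)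
            then some v' else none)
            = Option.filter (fun w => !(w == v))
                (if t' == "call" && decide ((pvLrd es).getD v' (-1) < i) then some v' else none)
          rw [PySem.Dict.getD_insert]
          by_cases hv : v' = v
          · subst hv
            have hd : decide (((0 : Int) + es.length) < i) = false := by
              simp only [decide_eq_false_iff_not]; omega
            by_cases hcnd : (t' == "call" && decide ((pvLrd es).getD v' (-1) < i)) = true
            · simp [hcnd, Option.filter]
              omega
            · simp [hcnd, Option.filter]
              omega
          · by_cases hcnd : (t' == "call" && decide ((pvLrd es).getD v' (-1) < i)) = true
            · simp [hv, hcnd, Option.filter]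
            · simp [hv, hcnd, Option.filter]
        rw [hcd, pvOfList_filter_ne, ← ih, ← pvStep_return]
        simp
      · have ht1 : (t == "call") = false := by simpa using hcall
        have ht2 : (t == "return") = false := by simpa using hret
        rw [hlrd, henum]
        simp only [ht2, Bool.false_eq_true, if_neg, not_false_eq_true]
        have hcd : pvCands (pvLrd es) (PySem.List.enumerate es ++ [(((0 : Int) + es.length), (t, v, x))])
            = pvCands (pvLrd es) (PySem.List.enumerate es) := by
          unfold pvCands
          rw [List.filterMap_append]
          simp [hcall]
        rw [hcd, ← ih]
        simp [ht1]

-- ===== VERDICT (by name: the statement is the Claim_ definition above) =====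
theorem get_active_nodes_spec : Claim_equal_get_active_nodes := by
  intro es _
  unfold Spec_get_active_nodes get_active_nodes_alt
  rw [pvFold_eq_update]
  show get_active_nodes es = PySem.Set.update PySem.Set.empty (pvCands (pvLrd es) (PySem.List.enumerate es))
  rw [show PySem.Set.empty.update (pvCands (pvLrd es) (PySem.List.enumerate es))
      = PySem.Set.ofList (pvCands (pvLrd es) (PySem.List.enumerate es)) from PySem.Set.update_empty _]
  exact pvA_eq_ofList_cands es
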